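-- pv_equiv track=rewrite | github.com/PriyadarshiniPG/PythoncodeRobotFramwork | robot/Libraries/Common/utils.py | _entries_consistent
-- ===== SOURCE A (Python) =====
-- def _entries_consistent(entries):
--     keys_to_check = (
--         'PDU_IP', 'RACK_PC_IP', 'RED_RAT_IR_IP',
--         'TEST_STATUS', 'LAB_NAME', 'OBELIX_SUPPORT', 'PANORAMIX_SUPPORT',
--         'PDU_TYPE', 'RACK_TYPE', 'REVERSE_PDU_SCHEMA', 'BROKER_URL',
--         'DEGRADED_MODE_BROKER', 'XAP_URL', 'XAP_PORT')
--     are_consistent = True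
--     first_entry = entries[0]
--     for entry in entries:
--         for key in keys_to_check:
--             if first_entry.get(key) != entry.get(key):
--                 are_consistent = False
--                 break
--     return are_consistent
-- ===== SOURCE B (Python) =====
-- def _entries_consistent(entries):
--     keys_to_check = (
--         'PDU_IP', 'RACK_PC_IP', 'RED_RAT_IR_IP',
--         'TEST_STATUS', 'LAB_NAME', 'OBELIX_SUPPORT', 'PANORAMIX_SUPPORT',
--         'PDU_TYPE', 'RACK_TYPE', 'REVERSE_PDU_SCHEMA', 'BROKER_URL',
--         'DEGRADED_MODE_BROKER', 'XAP_URL', 'XAP_PORT')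
--     # key-major: for each key, collect the distinct values across all entries
--     # into a set; the entries are consistent iff no key has two distinct values.
--     return all(len({e.get(k) for e in entries}) <= 1 for k in keys_to_check)
-- ===== Notes on version B (the rewrite author's own statement) =====
-- stated objective: simpler
-- what changed: Transposes the traversal to key-major: instead of comparing every entry key-by-key against the first entry with a flag, B collects for each key the set of distinct values across all entries and checks that no key's set has more than one value, with no reference to a first entry.
import Mathlib
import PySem

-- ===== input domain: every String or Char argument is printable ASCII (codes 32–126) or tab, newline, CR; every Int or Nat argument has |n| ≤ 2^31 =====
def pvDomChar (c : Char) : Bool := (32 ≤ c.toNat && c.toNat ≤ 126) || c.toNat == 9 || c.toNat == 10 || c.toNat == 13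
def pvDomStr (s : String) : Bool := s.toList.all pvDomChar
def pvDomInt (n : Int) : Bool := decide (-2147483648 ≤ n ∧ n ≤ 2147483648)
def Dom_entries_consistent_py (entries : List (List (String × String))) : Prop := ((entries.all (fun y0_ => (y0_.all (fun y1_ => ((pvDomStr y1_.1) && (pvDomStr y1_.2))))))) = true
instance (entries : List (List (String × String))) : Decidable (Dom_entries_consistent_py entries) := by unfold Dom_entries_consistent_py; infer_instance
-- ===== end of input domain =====

-- B transposes the traversal to key-major: per key it collects the distinct values
-- across all entries into a set and checks its size is ≤ 1 (objective: simpler).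

def pvKeys : List String :=
  ["PDU_IP", "RACK_PC_IP", "RED_RAT_IR_IP",
   "TEST_STATUS", "LAB_NAME", "OBELIX_SUPPORT", "PANORAMIX_SUPPORT",
   "PDU_TYPE", "RACK_TYPE", "REVERSE_PDU_SCHEMA", "BROKER_URL",
   "DEGRADED_MODE_BROKER", "XAP_URL", "XAP_PORT"]

-- entry.get(key): first-match lookup in the association list (Python dict .get, None = none)
def pvGet (e : List (String × String)) (k : String) : Option String :=
  (PySem.Dict.mk e).get? k

-- ===== PORT A =====
-- the inner 'for key in keys_to_check' loop with its break
def pvInnerA (first entry : List (String × String)) (f : Bool) : List String → Bool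
  | [] => f
  | k :: ks =>
      if pvGet first k ≠ pvGet entry k then false
      else pvInnerA first entry f ks

def entries_consistent_py (entries : List (List (String × String))) : Bool :=
  match entries with
  | [] => true  -- Python raises IndexError on entries[0]; excluded by Pre_
  | first :: _ => entries.foldl (fun f e => pvInnerA first e f pvKeys) true

-- ===== PORT B =====
-- all(len({e.get(k) for e in entries}) <= 1 for k in keys_to_check)
def entries_consistent_py_alt (entries : List (List (String × String))) : Bool :=
  pvKeys.all (fun k =>
    (PySem.Set.ofList (entries.map (fun e => pvGet e k))).length ≤ 1)

-- ===== PRECONDITION & SPEC =====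
-- A raises IndexError on the empty list at entries[0]; Pre_ excludes exactly that input.
def Pre_entries_consistent_py (entries : List (List (String × String))) : Prop := entries ≠ []
instance (entries : List (List (String × String))) : Decidable (Pre_entries_consistent_py entries) := by unfold Pre_entries_consistent_py; infer_instance
def pvWitness_entries_consistent_py : (List (List (String × String))) := [[("PDU_IP", "x")], [("PDU_IP", "x"), ("other", "y")]]

def Spec_entries_consistent_py (entries : List (List (String × String))) (out : Bool) : Prop := out = entries_consistent_py_alt entries
instance (entries : List (List (String × String))) (out : Bool) : Decidable (Spec_entries_consistent_py entries out) := by unfold Spec_entries_consistent_py; infer_instance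

-- ===== CLAIM =====
def Claim_equal_entries_consistent_py : Prop := ∀ (entries : List (List (String × String))), Dom_entries_consistent_py entries → Pre_entries_consistent_py entries → Spec_entries_consistent_py entries (entries_consistent_py entries)

-- ===== LEMMAS AND PROOFS =====

-- the inner break-scan equals comparing the two key-signatures, threaded through the flag
theorem pvInnerA_eq_sig (first entry : List (String × String)) (f : Bool) (ks : List String) :
    pvInnerA first entry f ks = if ks.map (pvGet entry) = ks.map (pvGet first) then f else false := by
  induction ks with
  | nil => simp [pvInnerA]
  | cons k ks ih =>
      simp only [pvInnerA, List.map_cons, ih]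
      by_cases h : pvGet first k = pvGet entry k
      · simp [h]
      · simp [h]
        intro hh
        exact absurd hh.symm h

-- folding 'if P e then f else false' from b computes b && all P
theorem foldl_if_false {α : Type} (P : α → Bool) (l : List α) (b : Bool) :
    l.foldl (fun f e => if P e = true then f else false) b = (b && l.all P) := by
  induction l generalizing b with
  | nil => simp
  | cons x xs ih =>
      simp only [List.foldl_cons, List.all_cons, ih]
      by_cases h : P x = true <;> simp [h]

-- a Python set has at most one element iff its source elements are pairwise equal
theorem set_len_le_one_iff (xs : List (Option String)) :
    (PySem.Set.ofList xs).length ≤ 1 ↔ ∀ a ∈ xs, ∀ b ∈ xs, a = b := by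
  constructor
  · intro h a ha b hb
    have ha' : a ∈ PySem.Set.ofList xs := by simpa [PySem.Set.mem_ofList] using ha
    have hb' : b ∈ PySem.Set.ofList xs := by simpa [PySem.Set.mem_ofList] using hb
    match hs : PySem.Set.ofList xs with
    | [] => rw [hs] at ha'; exact absurd ha' (List.not_mem_nil)
    | [z] =>
        rw [hs] at ha' hb'
        simp_all
    | z :: w :: t => rw [hs] at h; simp at h
  · intro h
    by_contra hlen
    push Not at hlen
    have hnd := PySem.Set.nodup_ofList (xs := xs)
    have h0 : 0 < (PySem.Set.ofList xs).length := by omega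
    have h1 : 1 < (PySem.Set.ofList xs).length := hlen
    have hne : (PySem.Set.ofList xs)[0] ≠ (PySem.Set.ofList xs)[1] := by
      intro he
      have := List.Nodup.getElem_inj_iff hnd (i := 0) (j := 1) |>.mp he
      omega
    have hm0 : (PySem.Set.ofList xs)[0] ∈ xs := by
      rw [← PySem.Set.mem_ofList]; exact List.getElem_mem h0
    have hm1 : (PySem.Set.ofList xs)[1] ∈ xs := by
      rw [← PySem.Set.mem_ofList]; exact List.getElem_mem h1
    exact hne (h _ hm0 _ hm1)

-- ===== VERDICT =====
theorem entries_consistent_py_spec : Claim_equal_entries_consistent_py := by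
  intro entries _ hpre
  unfold Spec_entries_consistent_py entries_consistent_py entries_consistent_py_alt
  match entries with
  | [] => exact absurd rfl hpre
  | first :: rest =>
      -- A-side: the fold is 'all signatures equal first's'
      have h1 : ∀ e f, pvInnerA first e f pvKeys
          = if (pvKeys.map (pvGet e) == pvKeys.map (pvGet first)) = true then f else false := by
        intro e f
        rw [pvInnerA_eq_sig]
        simp
      simp only [h1]
      rw [foldl_if_false (fun e => pvKeys.map (pvGet e) == pvKeys.map (pvGet first))]
      simp only [Bool.true_and]
      -- both sides as Props
      rw [Bool.eq_iff_iff]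
      simp only [List.all_eq_true, beq_iff_eq, decide_eq_true_eq, set_len_le_one_iff,
        List.mem_map, forall_exists_index, and_imp]
      constructor
      · intro hA k hk a e he hae b e' he' hbe'
        subst hae hbe'
        have h1 := List.map_inj_left.mp (hA e he) k hk
        have h2 := List.map_inj_left.mp (hA e' he') k hk
        rw [h1, h2]
      · intro hB e he
        apply List.map_inj_left.mpr
        intro k hk
        exact hB k hk _ e he rfl _ first (List.mem_cons_self) rfl
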